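-- pv_equiv track=rewrite | github.com/NivAm12/Enhancing-By-Subtasks-Components | data/RelationExtraction/create_n2c2_dataset.py | get_last_char_position
-- ===== SOURCE A (Python) =====
-- def get_last_char_position(sentence, word_position):
--     words = sentence.split()
--     char_count = 0
--
--     for i in range(word_position):
--
--         char_count += len(words[i]) + 1  # Add 1 for the space after each word
--
--     start_char_position = char_count
--     last_char_position = start_char_position + len(words[word_position])
--
--     return last_char_position
-- ===== SOURCE B (Python) =====
-- def get_last_char_position(sentence, word_position):
--     words = sentence.split()
--     last = len(words[word_position])
--     if word_position <= 0:
--         return last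
--     return len(' '.join(words[:word_position])) + 1 + last
-- ===== Notes on version B (the rewrite author's own statement) =====
-- stated objective: simpler
-- what changed: Replaces the explicit index loop that accumulates word lengths with a join-and-measure decomposition: len(' '.join(words[:word_position])) + 1 gives the prefix length directly.
import Mathlib
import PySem

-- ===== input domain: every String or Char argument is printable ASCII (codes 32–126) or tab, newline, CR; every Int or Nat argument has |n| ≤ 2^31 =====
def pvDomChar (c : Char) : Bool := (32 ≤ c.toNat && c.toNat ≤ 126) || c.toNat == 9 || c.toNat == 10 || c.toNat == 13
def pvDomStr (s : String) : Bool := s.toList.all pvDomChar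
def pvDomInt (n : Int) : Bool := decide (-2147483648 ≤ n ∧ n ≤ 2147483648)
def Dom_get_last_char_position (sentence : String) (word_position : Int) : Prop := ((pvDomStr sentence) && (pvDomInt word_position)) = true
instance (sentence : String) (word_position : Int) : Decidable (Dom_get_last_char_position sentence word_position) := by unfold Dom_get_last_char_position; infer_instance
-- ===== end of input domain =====

-- B replaces A's index-accumulation loop with a join-and-measure decomposition (objective: simpler).
-- ===== PORT A =====
def get_last_char_position (sentence : String) (word_position : Int) : Int :=
  let words := PySem.Str.split₀ sentence
  let char_count : Int :=
    (PySem.List.pyRange 0 word_position 1).foldl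
      (fun char_count i => char_count + PySem.Str.len (PySem.List.pyGetD words i "") + 1) 0
  let start_char_position := char_count
  let last_char_position := start_char_position + PySem.Str.len (PySem.List.pyGetD words word_position "")
  last_char_position

-- ===== PORT B =====
def get_last_char_position_alt (sentence : String) (word_position : Int) : Int :=
  let words := PySem.Str.split₀ sentence
  let last := PySem.Str.len (PySem.List.pyGetD words word_position "")
  if word_position ≤ 0 then last
  else PySem.Str.len (PySem.Str.join " " (PySem.List.slice words none (some word_position))) + 1 + last

-- ===== PRECONDITION & SPEC =====
-- Pre_: exactly the inputs where Python A returns (word_position a valid Python index into sentence.split(); otherwise IndexError)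
def Pre_get_last_char_position (sentence : String) (word_position : Int) : Prop :=
  PySem.Raise.InRange (PySem.Str.split₀ sentence).length word_position
instance (sentence : String) (word_position : Int) : Decidable (Pre_get_last_char_position sentence word_position) := by
  unfold Pre_get_last_char_position; infer_instance
def pvWitness_get_last_char_position : String × Int := ("hello brave world", 1)

def Spec_get_last_char_position (sentence : String) (word_position : Int) (out : Int) : Prop := out = get_last_char_position_alt sentence word_position
instance (sentence : String) (word_position : Int) (out : Int) : Decidable (Spec_get_last_char_position sentence word_position out) := by unfold Spec_get_last_char_position; infer_instance

-- ===== CLAIM (what is proved, stated in full; the proofs are below) =====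
def Claim_equal_get_last_char_position : Prop := ∀ (sentence : String) (word_position : Int), Dom_get_last_char_position sentence word_position → Pre_get_last_char_position sentence word_position → Spec_get_last_char_position sentence word_position (get_last_char_position sentence word_position)

-- ===== LEMMAS AND PROOFS =====

-- The first n words, read off by index through the loop's range.
theorem take_of_map_pyGetD_pyRange (ws : List String) (n : Nat) (h : n ≤ ws.length) :
    (PySem.List.pyRange 0 (n : Int) 1).map (fun i => PySem.List.pyGetD ws i "") = ws.take n := by
  induction n with
  | zero => simp [PySem.List.pyRange_one_eq_nil]
  | succ k ih =>
    have hk : k ≤ ws.length := Nat.le_of_succ_le h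
    have hklt : k < ws.length := h
    push_cast
    rw [PySem.List.pyRange_one_succ_right (by positivity), List.map_append, ih hk,
      List.take_add_one]
    rw [List.map_singleton, PySem.List.pyGetD_natCast, List.getD_eq_getElem?_getD,
      List.getElem?_eq_getElem hklt]
    rfl

-- Length of ' '.join on the Chars side: each word after the first costs its length plus one separator.
theorem join_space_length (p : List Char) (rest : List (List Char)) :
    (PySem.Chars.join [' '] (p :: rest)).length
      = p.length + (rest.map (fun q => q.length + 1)).sum := by
  induction rest generalizing p with
  | nil => simp [PySem.Chars.join_singleton]
  | cons q rest ih =>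
    rw [PySem.Chars.join_cons_cons]
    simp [ih q]
    omega

-- The Int-valued word-length sum equals the cast of its Nat-valued twin.
theorem sum_len_cast (rest : List String) :
    (rest.map (fun w => PySem.Str.len w + 1)).sum
      = ((((rest.map String.toList).map (fun q => q.length + 1)).sum : Nat) : Int) := by
  induction rest with
  | nil => simp
  | cons w rest ih =>
    rw [List.map_cons, List.sum_cons, ih, List.map_cons, List.map_cons, List.sum_cons,
      PySem.Str.len_eq]
    push_cast
    ring

-- Length of ' '.join on a nonempty list of words, as an Int.
theorem join_space_len (parts : List String) (h : parts ≠ []) :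
    PySem.Str.len (PySem.Str.join " " parts)
      = (parts.map (fun w => PySem.Str.len w + 1)).sum - 1 := by
  obtain ⟨p, rest, rfl⟩ := List.exists_cons_of_ne_nil h
  rw [PySem.Str.len_eq, PySem.Str.toList_join,
    show (" ".toList : List Char) = [' '] from rfl, List.map_cons, join_space_length,
    List.map_cons, List.sum_cons, sum_len_cast rest, PySem.Str.len_eq]
  push_cast
  ring

-- ===== VERDICT (by name: the statement is the Claim_ definition above) =====
theorem get_last_char_position_spec : Claim_equal_get_last_char_position := by
  intro sentence word_position _ hpre
  unfold Spec_get_last_char_position get_last_char_position get_last_char_position_alt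
  dsimp only
  set ws := PySem.Str.split₀ sentence with hws
  unfold Pre_get_last_char_position PySem.Raise.InRange at hpre
  rw [← hws] at hpre
  by_cases hle : word_position ≤ 0
  · rw [if_pos hle, PySem.List.pyRange_one_eq_nil hle]
    simp
  · rw [if_neg hle]
    rw [not_le] at hle
    set n : Nat := word_position.toNat with hn
    have hwp : word_position = (n : Int) := (Int.toNat_of_nonneg (le_of_lt hle)).symm
    have hnlt : n < ws.length := by omega
    have hn1 : 1 ≤ n := by omega
    have hfold :
        (PySem.List.pyRange 0 word_position 1).foldl
            (fun char_count i => char_count + PySem.Str.len (PySem.List.pyGetD ws i "") + 1) 0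
          = ((PySem.List.pyRange 0 word_position 1).map
                (fun i => PySem.Str.len (PySem.List.pyGetD ws i "") + 1)).sum := by
      simp only [add_assoc]
      rw [PySem.List.foldl_add _ (fun i => PySem.Str.len (PySem.List.pyGetD ws i "") + 1) 0]
      simp
    have hmap :
        (PySem.List.pyRange 0 word_position 1).map
            (fun i => PySem.Str.len (PySem.List.pyGetD ws i "") + 1)
          = (ws.take n).map (fun w => PySem.Str.len w + 1) := by
      rw [← take_of_map_pyGetD_pyRange ws n (le_of_lt hnlt), List.map_map, hwp]
      rfl
    rw [hfold, hmap, PySem.List.slice_to ws (le_of_lt hle), hwp, Int.toNat_natCast,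
      join_space_len (ws.take n)
        (by apply List.ne_nil_of_length_pos; rw [List.length_take]; omega)]
    omega
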